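-- pv_equiv track=rewrite | github.com/dmzoneill/jira-creator | helper_create_unit_test.py | extract_tests_from_output
-- ===== SOURCE A (Python) =====
-- def extract_tests_from_output(output):
--     lines = output.splitlines()
--
--     cli_test_code = []
--     rest_test_code = []
--
--     current_test = None
--     current_test_content = None
--
--     for line in lines:
--         # Look for file paths starting with '#'
--         if line.startswith("# tests/"):
--             # If we're currently processing a file, save its content
--             if current_test:
--                 # Save the previous test content to the correct file
--                 if "commands" in str(current_test):
--                     cli_test_code = current_test_content
--                 else:
--                     rest_test_code = current_test_content
--
--             # Start a new test file
--             current_test = line.strip()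
--             current_test_content = []
--
--         elif current_test:
--             # Add lines to the current test content
--             if line.startswith("```"):
--                 # Skip lines containing ```, this is a code block delimiter
--                 continue
--             current_test_content.append(line)
--
--     # Capture the last file's content after loop ends
--     if current_test:
--         if "commands" in current_test:
--             cli_test_code = current_test_content
--         else:
--             rest_test_code = current_test_content
--
--     res = "\n".join(cli_test_code), "\n".join(rest_test_code)
--     return res
-- ===== SOURCE B (Python) =====
-- def extract_tests_from_output(output):
--     # Pass 1: parse the lines into (header, body) blocks.
--     blocks = []
--     for line in output.splitlines():
--         if line.startswith("# tests/"):
--             blocks.append((line.strip(), []))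
--         elif blocks and not line.startswith("```"):
--             blocks[-1][1].append(line)
--     # Pass 2: classify blocks; a later block of the same class overwrites.
--     cli, rest = [], []
--     for header, body in blocks:
--         if "commands" in header:
--             cli = body
--         else:
--             rest = body
--     return "\n".join(cli), "\n".join(rest)
-- ===== Notes on version B (the rewrite author's own statement) =====
-- stated objective: simpler
-- what changed: B splits the work into two passes — first parse the lines into a list of (header, body) blocks, then classify each block as CLI or REST (later blocks overwrite) — instead of A's single stateful scan that flushes the pending block on each new header and again after the loop.
import Mathlib
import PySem

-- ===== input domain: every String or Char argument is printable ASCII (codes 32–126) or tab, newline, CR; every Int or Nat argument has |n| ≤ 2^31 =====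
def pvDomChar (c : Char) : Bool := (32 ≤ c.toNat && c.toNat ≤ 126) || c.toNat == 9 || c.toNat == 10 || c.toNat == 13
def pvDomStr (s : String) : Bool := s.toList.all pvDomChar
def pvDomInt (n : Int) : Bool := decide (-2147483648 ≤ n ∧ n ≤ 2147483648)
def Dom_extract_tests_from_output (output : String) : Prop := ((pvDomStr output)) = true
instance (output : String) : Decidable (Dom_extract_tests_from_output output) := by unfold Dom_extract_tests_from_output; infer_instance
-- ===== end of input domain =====

-- B separates parsing into (header, body) blocks from classifying the blocks, instead of A's
-- single stateful scan with deferred flushing; objective: simpler decomposition, same O(n) cost.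

-- ===== PORT A =====
-- A's loop state: (cli_test_code, rest_test_code, current_test, current_test_content)
def pvAStep : (List String × List String × Option String × List String) → String →
    (List String × List String × Option String × List String)
  | (cli, rest, cur, content), line =>
    if PySem.Str.startswith line "# tests/" then
      -- flush the previous block (Python truthiness: `if current_test:`)
      let flushed : List String × List String :=
        match cur with
        | some t =>
          if t != "" then
            if PySem.Str.isIn "commands" t then (content, rest) else (cli, content)
          else (cli, rest)
        | none => (cli, rest)
      (flushed.1, flushed.2, some (PySem.Str.strip line), [])
    else
      match cur with
      | some t =>
        if t != "" then
          if PySem.Str.startswith line "```" then (cli, rest, some t, content)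
          else (cli, rest, some t, content ++ [line])
        else (cli, rest, some t, content)
      | none => (cli, rest, none, content)

def extract_tests_from_output (output : String) : String × String :=
  match (PySem.Str.splitlines output).foldl pvAStep ([], [], none, []) with
  | (cli, rest, cur, content) =>
    match cur with
    | some t =>
      if t != "" then
        if PySem.Str.isIn "commands" t then
          (PySem.Str.join "\n" content, PySem.Str.join "\n" rest)
        else
          (PySem.Str.join "\n" cli, PySem.Str.join "\n" content)
      else (PySem.Str.join "\n" cli, PySem.Str.join "\n" rest)
    | none => (PySem.Str.join "\n" cli, PySem.Str.join "\n" rest)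

-- ===== PORT B =====
-- blocks[-1][1].append(line): mutate the body of the last block
def pvAppendLast (blocks : List (String × List String)) (line : String) :
    List (String × List String) :=
  match blocks.getLast? with
  | none => blocks
  | some (h, b) => blocks.dropLast ++ [(h, b ++ [line])]

-- pass 1: parse the lines into (header, body) blocks
def pvParseStep (blocks : List (String × List String)) (line : String) :
    List (String × List String) :=
  if PySem.Str.startswith line "# tests/" then blocks ++ [(PySem.Str.strip line, [])]
  else if !blocks.isEmpty && !PySem.Str.startswith line "```" then pvAppendLast blocks line
  else blocks

-- pass 2: classify a block; a later block of the same class overwrites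
def pvClassStep (p : List String × List String) (hb : String × List String) :
    List String × List String :=
  if PySem.Str.isIn "commands" hb.1 then (hb.2, p.2) else (p.1, hb.2)

def extract_tests_from_output_alt (output : String) : String × String :=
  match ((PySem.Str.splitlines output).foldl pvParseStep []).foldl pvClassStep ([], []) with
  | (cli, rest) => (PySem.Str.join "\n" cli, PySem.Str.join "\n" rest)

-- ===== PRECONDITION & SPEC =====
def Spec_extract_tests_from_output (output : String) (out : String × String) : Prop :=
  out = extract_tests_from_output_alt output
instance (output : String) (out : String × String) :
    Decidable (Spec_extract_tests_from_output output out) := by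
  unfold Spec_extract_tests_from_output; infer_instance

-- ===== CLAIM (what is proved, stated in full; the proofs are below) =====
def Claim_equal_extract_tests_from_output : Prop :=
  ∀ (output : String), Dom_extract_tests_from_output output →
    Spec_extract_tests_from_output output (extract_tests_from_output output)

-- ===== LEMMAS AND PROOFS =====

def pvClassify (blocks : List (String × List String)) : List String × List String :=
  blocks.foldl pvClassStep ([], [])

-- abstraction: what A's loop state is, as a function of B's blocks-so-far
def pvAbs (blocks : List (String × List String)) :
    List String × List String × Option String × List String :=
  match blocks.getLast? with
  | none => ([], [], none, [])
  | some (h, b) => ((pvClassify blocks.dropLast).1, (pvClassify blocks.dropLast).2, some h, b)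

theorem pvAbs_concat (xs : List (String × List String)) (h : String) (b : List String) :
    pvAbs (xs ++ [(h, b)]) = ((pvClassify xs).1, (pvClassify xs).2, some h, b) := by
  simp [pvAbs]

theorem pvAppendLast_concat (xs : List (String × List String)) (h : String) (b : List String)
    (line : String) : pvAppendLast (xs ++ [(h, b)]) line = xs ++ [(h, b ++ [line])] := by
  simp [pvAppendLast]

theorem pvClassify_concat (xs : List (String × List String)) (h : String) (b : List String) :
    pvClassify (xs ++ [(h, b)]) =
      if PySem.Str.isIn "commands" h then (b, (pvClassify xs).2) else ((pvClassify xs).1, b) := by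
  simp [pvClassify, pvClassStep]

theorem pvStrip_ne_empty (line : String)
    (hs : PySem.Str.startswith line "# tests/" = true) : PySem.Str.strip line ≠ "" := by
  intro he
  have hsC : PySem.Chars.startswith line.toList "# tests/".toList = true := by
    simpa using hs
  obtain ⟨t, ht⟩ := (PySem.Chars.startswith_iff line.toList "# tests/".toList).mp hsC
  have hlist : line.toList = '#' :: (" tests/".toList ++ t) := by rw [← ht]; rfl
  have htl : PySem.Chars.strip line.toList = [] := by
    rw [← PySem.Str.toList_strip, he]; rfl
  unfold PySem.Chars.strip PySem.Chars.rstrip PySem.Chars.lstrip at htl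
  have hsp : PySem.Chars.isspace '#' = false := by decide
  have hdw : List.dropWhile PySem.Chars.isspace line.toList = line.toList := by
    rw [hlist, List.dropWhile_cons, hsp]; simp
  rw [hdw] at htl
  have h0 : List.dropWhile PySem.Chars.isspace line.toList.reverse = [] := by
    simpa using congrArg List.reverse htl
  have hmem : '#' ∈ line.toList.reverse := by rw [hlist]; simp
  have hcontra := List.dropWhile_eq_nil_iff.mp h0 '#' hmem
  rw [hsp] at hcontra
  exact absurd hcontra (by simp)

theorem pvInv (lines : List String) :
    ∀ (blocks : List (String × List String)), (∀ p ∈ blocks, p.1 ≠ "") →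
      lines.foldl pvAStep (pvAbs blocks) = pvAbs (lines.foldl pvParseStep blocks)
        ∧ ∀ p ∈ lines.foldl pvParseStep blocks, p.1 ≠ "" := by
  induction lines with
  | nil => intro blocks hgood; exact ⟨rfl, hgood⟩
  | cons line rest ih =>
    intro blocks hgood
    have hstep : pvAStep (pvAbs blocks) line = pvAbs (pvParseStep blocks line)
        ∧ ∀ p ∈ pvParseStep blocks line, p.1 ≠ "" := by
      rcases List.eq_nil_or_concat blocks with hb | ⟨xs, ⟨h, b⟩, hb⟩
      · subst hb
        by_cases hs : PySem.Str.startswith line "# tests/" = true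
        · have e1 : pvParseStep [] line = [] ++ [(PySem.Str.strip line, [])] := by
            unfold pvParseStep; rw [if_pos hs]
          constructor
          · rw [e1, pvAbs_concat]
            show pvAStep ([], [], none, []) line = _
            simp only [pvAStep, if_pos hs]
            rfl
          · intro p hp
            rw [e1] at hp
            simp only [List.nil_append, List.mem_singleton] at hp
            subst hp; exact pvStrip_ne_empty line hs
        · have e1 : pvParseStep [] line = [] := by
            unfold pvParseStep; rw [if_neg hs, if_neg (by simp)]
          constructor
          · rw [e1]
            show pvAStep ([], [], none, []) line = pvAbs []
            simp only [pvAStep, if_neg hs]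
            rfl
          · intro p hp; rw [e1] at hp; simp at hp
      · rw [List.concat_eq_append] at hb
        subst hb
        have hh : h ≠ "" := hgood (h, b) (by simp)
        have hhb : (h != "") = true := by simpa using hh
        by_cases hs : PySem.Str.startswith line "# tests/" = true
        · have e1 : pvParseStep (xs ++ [(h, b)]) line =
              (xs ++ [(h, b)]) ++ [(PySem.Str.strip line, [])] := by
            unfold pvParseStep; rw [if_pos hs]
          constructor
          · rw [e1, pvAbs_concat, pvAbs_concat, pvClassify_concat]
            show pvAStep ((pvClassify xs).1, (pvClassify xs).2, some h, b) line = _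
            simp only [pvAStep, if_pos hs, if_pos hhb]
          · intro p hp
            rw [e1] at hp
            simp only [List.mem_append, List.mem_singleton] at hp
            rcases hp with (hp | hp) | hp
            · exact hgood p (by simp [hp])
            · subst hp; exact hgood (h, b) (by simp)
            · subst hp; exact pvStrip_ne_empty line hs
        · by_cases hbq : PySem.Str.startswith line "```" = true
          · have hbqC : PySem.Chars.startswith line.toList ['`', '`', '`'] = true := by
              simpa using hbq
            have e1 : pvParseStep (xs ++ [(h, b)]) line = xs ++ [(h, b)] := by
              unfold pvParseStep; rw [if_neg hs, if_neg (by simp [hbqC])]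
            constructor
            · rw [e1, pvAbs_concat]
              show pvAStep ((pvClassify xs).1, (pvClassify xs).2, some h, b) line = _
              simp only [pvAStep, if_neg hs, if_pos hhb, if_pos hbq]
            · intro p hp; rw [e1] at hp; exact hgood p hp
          · have hbqC : PySem.Chars.startswith line.toList ['`', '`', '`'] = false := by
              simpa using hbq
            have e1 : pvParseStep (xs ++ [(h, b)]) line = xs ++ [(h, b ++ [line])] := by
              unfold pvParseStep
              rw [if_neg hs, if_pos (by simp [hbqC]), pvAppendLast_concat]
            constructor
            · rw [e1, pvAbs_concat, pvAbs_concat]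
              show pvAStep ((pvClassify xs).1, (pvClassify xs).2, some h, b) line = _
              simp only [pvAStep, if_neg hs, if_pos hhb, if_neg hbq]
            · intro p hp
              rw [e1] at hp
              simp only [List.mem_append, List.mem_singleton] at hp
              rcases hp with hp | hp
              · exact hgood p (by simp [hp])
              · subst hp; exact hgood (h, b) (by simp)
    rw [List.foldl_cons, List.foldl_cons, hstep.1]
    exact ih (pvParseStep blocks line) hstep.2

-- ===== VERDICT (by name: the statement is the Claim_ definition above) =====
theorem extract_tests_from_output_spec : Claim_equal_extract_tests_from_output := by
  intro output _
  unfold Spec_extract_tests_from_output extract_tests_from_output extract_tests_from_output_alt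
  obtain ⟨h1, h2⟩ := pvInv (PySem.Str.splitlines output) [] (by simp)
  rw [show (([], [], none, []) :
      List String × List String × Option String × List String) = pvAbs [] from rfl, h1]
  rcases List.eq_nil_or_concat ((PySem.Str.splitlines output).foldl pvParseStep [])
    with hb | ⟨xs, ⟨h, b⟩, hb⟩
  · rw [hb]; rfl
  · rw [List.concat_eq_append] at hb
    rw [hb] at h2 ⊢
    have hh : h ≠ "" := h2 (h, b) (by simp)
    have hhb : (h != "") = true := by simpa using hh
    have e2 : List.foldl pvClassStep (([], []) : List String × List String) (xs ++ [(h, b)])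
        = if PySem.Str.isIn "commands" h = true then (b, (pvClassify xs).2)
          else ((pvClassify xs).1, b) := pvClassify_concat xs h b
    rw [pvAbs_concat, e2]
    by_cases hc : PySem.Str.isIn "commands" h = true
    · simp only [if_pos hhb, if_pos hc]
    · simp only [if_pos hhb, if_neg hc]
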